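-- pv_equiv track=rewrite | github.com/PugtgYosuky/EDCA | analysis/utils.py | get_attribute_name
-- ===== SOURCE A (Python) =====
-- def get_attribute_name(attribute):
--     attributes_map = {
--         'age' : ['age'],
--         'race' : ['race'],
--         'gender' : ['gender', 'sex', 'x2'],
--         'marital' : ['marital', 'x4'],
--         'education' : ['x3']
--     }
--     if attribute in attributes_map.keys():
--         return attribute
--     for key, values in attributes_map.items():
--         if attribute in values:
--             return key
-- ===== SOURCE B (Python) =====
-- def get_attribute_name(attribute):
--     attributes_map = {
--         'age' : ['age'],
--         'race' : ['race'],
--         'gender' : ['gender', 'sex', 'x2'],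
--         'marital' : ['marital', 'x4'],
--         'education' : ['x3']
--     }
--     reverse = {v: k for k, vs in attributes_map.items() for v in vs}
--     for k in attributes_map:
--         reverse[k] = k
--     return reverse.get(attribute)
-- ===== Notes on version B (the rewrite author's own statement) =====
-- stated objective: simpler
-- what changed: Replaces the key-membership check plus per-key list scan with one inverted lookup table (value -> canonical key, with every canonical key overwriting to map to itself) and a single dict .get.
import Mathlib
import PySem

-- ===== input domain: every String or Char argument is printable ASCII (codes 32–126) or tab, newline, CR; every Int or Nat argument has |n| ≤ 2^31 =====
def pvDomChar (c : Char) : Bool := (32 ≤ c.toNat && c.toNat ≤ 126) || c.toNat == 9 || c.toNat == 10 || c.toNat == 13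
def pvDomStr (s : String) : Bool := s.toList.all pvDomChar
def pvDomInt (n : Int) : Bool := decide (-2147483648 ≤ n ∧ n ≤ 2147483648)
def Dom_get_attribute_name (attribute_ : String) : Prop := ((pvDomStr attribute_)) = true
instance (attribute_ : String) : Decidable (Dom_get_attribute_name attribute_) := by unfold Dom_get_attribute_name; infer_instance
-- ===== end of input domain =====

-- B replaces A's key-check-then-scan control flow with one precomputed inverted table and a single lookup (simpler).

-- ===== PORT A =====
-- the module-level constant dict of A
def pvAttributesMap : PySem.Dict String (List String) :=
  PySem.Dict.ofList
    [("age", ["age"]), ("race", ["race"]), ("gender", ["gender", "sex", "x2"]),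
     ("marital", ["marital", "x4"]), ("education", ["x3"])]

-- the 'for key, values in attributes_map.items(): if attribute in values: return key' loop
def pvLoopA (attribute_ : String) : List (String × List String) → Option String
  | [] => none
  | (key, values) :: rest =>
      if attribute_ ∈ values then some key else pvLoopA attribute_ rest

def get_attribute_name (attribute_ : String) : Option String :=
  if attribute_ ∈ pvAttributesMap.keys then some attribute_
  else pvLoopA attribute_ pvAttributesMap.items

-- ===== PORT B =====
-- reverse = {v: k for k, vs in items for v in vs}; then reverse[k] = k for each key; then reverse.get(attribute)
def pvReverse : PySem.Dict String String :=
  let rev := pvAttributesMap.items.foldl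
    (fun d kv => kv.2.foldl (fun d v => d.insert v kv.1) d) PySem.Dict.empty
  pvAttributesMap.keys.foldl (fun d k => d.insert k k) rev

def get_attribute_name_alt (attribute_ : String) : Option String :=
  pvReverse.get? attribute_

-- ===== PRECONDITION & SPEC =====
def Spec_get_attribute_name (attribute_ : String) (out : Option String) : Prop := out = get_attribute_name_alt attribute_
instance (attribute_ : String) (out : Option String) : Decidable (Spec_get_attribute_name attribute_ out) := by unfold Spec_get_attribute_name; infer_instance

-- ===== CLAIM (what is proved, stated in full; the proofs are below) =====
def Claim_equal_get_attribute_name : Prop := ∀ (attribute_ : String), Dom_get_attribute_name attribute_ → Spec_get_attribute_name attribute_ (get_attribute_name attribute_)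

-- ===== LEMMAS AND PROOFS =====

-- ===== VERDICT (by name: the statement is the Claim_ definition above) =====
theorem get_attribute_name_spec : Claim_equal_get_attribute_name := by
  intro a _
  unfold Spec_get_attribute_name get_attribute_name get_attribute_name_alt
  by_cases h1 : a = "age"
  · subst h1; decide
  by_cases h2 : a = "race"
  · subst h2; decide
  by_cases h3 : a = "gender"
  · subst h3; decide
  by_cases h4 : a = "sex"
  · subst h4; decide
  by_cases h5 : a = "x2"
  · subst h5; decide
  by_cases h6 : a = "marital"
  · subst h6; decide
  by_cases h7 : a = "x4"
  · subst h7; decide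
  by_cases h8 : a = "x3"
  · subst h8; decide
  by_cases h9 : a = "education"
  · subst h9; decide
  simp [pvAttributesMap, pvReverse, pvLoopA, PySem.Dict.ofList, PySem.Dict.get?,
    PySem.Dict.insert, PySem.Dict.keys, PySem.Dict.empty,
    PySem.Dict.update, PySem.Dict.contains, h1, h2, h3, h4, h5, h6, h7, h8, h9]
  exact ⟨fun h => h1 h.symm, fun h => h2 h.symm, fun h => h3 h.symm, fun h => h4 h.symm,
    fun h => h5 h.symm, fun h => h6 h.symm, fun h => h7 h.symm, fun h => h8 h.symm, fun h => h9 h.symm⟩
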